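-- pv_equiv track=rewrite | github.com/Arisha1234567/- | 22.py | min_digit_sum
-- ===== SOURCE A (Python) =====
-- def min_digit_sum(a: int, b: int) -> int:
--     min_sum = float('inf')
--     count = 0
--
--     for i in range(a, b + 1):
--         current_sum = 0
--         temp = i
--         while temp > 0:
--             current_sum += temp % 10
--             temp //= 10
--
--         if current_sum < min_sum:
--             min_sum = current_sum
--             count = 1
--         elif current_sum == min_sum:
--             count += 1
--
--     return count
-- ===== SOURCE B (Python) =====
-- def _dsum(t):
--     return 0 if t <= 0 else t % 10 + _dsum(t // 10)
--
--
-- def min_digit_sum(a: int, b: int) -> int: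
--     # histogram of digit sums, then one lookup at the minimal key
--     counts = {}
--     for i in range(a, b + 1):
--         s = _dsum(i)
--         counts[s] = counts.get(s, 0) + 1
--     if not counts:
--         return 0
--     return counts[min(counts)]
-- ===== Notes on version B (the rewrite author's own statement) =====
-- stated objective: alternative
-- what changed: Instead of tracking a running minimum and its count with branch logic in one pass, B builds a dict histogram of digit sums (digit sum computed by a recursive helper) and returns the entry at the minimal key.
import Mathlib
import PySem

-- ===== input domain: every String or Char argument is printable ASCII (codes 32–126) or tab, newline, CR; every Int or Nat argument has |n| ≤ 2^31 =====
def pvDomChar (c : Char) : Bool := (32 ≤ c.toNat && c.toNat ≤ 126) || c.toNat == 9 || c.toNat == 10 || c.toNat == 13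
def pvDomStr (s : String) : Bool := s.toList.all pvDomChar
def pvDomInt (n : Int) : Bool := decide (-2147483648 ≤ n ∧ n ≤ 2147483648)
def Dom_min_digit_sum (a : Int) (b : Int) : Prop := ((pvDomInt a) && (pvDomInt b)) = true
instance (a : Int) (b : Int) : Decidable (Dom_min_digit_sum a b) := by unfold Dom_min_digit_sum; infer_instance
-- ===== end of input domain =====

-- B replaces A's running-minimum-and-count pass by a dict histogram of digit sums consulted at its minimal key (alternative decomposition, same cost).

-- ===== PORT A =====
-- A's inner 'while temp > 0' loop, carrying current_sum
def pvDigitLoop (current_sum : Int) (temp : Int) : Int :=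
  if temp > 0 then
    pvDigitLoop (current_sum + PySem.Int.mod temp 10) (PySem.Int.floordiv temp 10)
  else current_sum
termination_by temp.toNat
decreasing_by
  simp only [PySem.Int.floordiv_eq_ediv_of_pos (by norm_num : (0:Int) < 10)]
  omega

-- min_sum = float('inf') is ported as 'none' (no digit sum compares ≥ inf, and < inf always holds)
def min_digit_sum (a : Int) (b : Int) : Int :=
  (((PySem.List.pyRange a (b + 1) 1).foldl
    (fun (st : Option Int × Int) i =>
      let current_sum := pvDigitLoop 0 i
      match st.1 with
      | none => (some current_sum, 1)
      | some m =>
        if current_sum < m then (some current_sum, 1)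
        else if current_sum = m then (some m, st.2 + 1)
        else st)
    (none, 0))).2

-- ===== PORT B =====
def pvAltDsum (t : Int) : Int :=
  if t ≤ 0 then 0 else PySem.Int.mod t 10 + pvAltDsum (PySem.Int.floordiv t 10)
termination_by t.toNat
decreasing_by
  simp only [PySem.Int.floordiv_eq_ediv_of_pos (by norm_num : (0:Int) < 10)]
  omega

def min_digit_sum_alt (a : Int) (b : Int) : Int :=
  let counts := (PySem.List.pyRange a (b + 1) 1).foldl
    (fun (d : PySem.Dict Int Int) i => d.insert (pvAltDsum i) (d.getD (pvAltDsum i) 0 + 1))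
    PySem.Dict.empty
  match PySem.List.min? counts.keys (fun x => x) with
  | none => 0                 -- 'if not counts: return 0'
  | some m => counts.getD m 0 -- counts[min(counts)]; the minimal key is present, so getD is exact

-- ===== PRECONDITION & SPEC =====
def Spec_min_digit_sum (a : Int) (b : Int) (out : Int) : Prop := out = min_digit_sum_alt a b
instance (a : Int) (b : Int) (out : Int) : Decidable (Spec_min_digit_sum a b out) := by unfold Spec_min_digit_sum; infer_instance

-- ===== CLAIM (what is proved, stated in full; the proofs are below) =====
def Claim_equal_min_digit_sum : Prop := ∀ (a : Int) (b : Int), Dom_min_digit_sum a b → Spec_min_digit_sum a b (min_digit_sum a b)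

-- ===== LEMMAS AND PROOFS =====

-- the two digit-sum routines agree
theorem pvDigitLoop_eq (t : Int) : ∀ c, pvDigitLoop c t = c + pvAltDsum t := by
  induction t using pvAltDsum.induct with
  | case1 t h =>
    intro c
    rw [pvDigitLoop, pvAltDsum]
    simp [h]
  | case2 t h ih =>
    intro c
    rw [pvDigitLoop, pvAltDsum]
    simp only [if_pos (by omega : t > 0), if_neg h]
    rw [ih]
    ring

def pvStepA (st : Option Int × Int) (i : Int) : Option Int × Int :=
  let current_sum := pvDigitLoop 0 i
  match st.1 with
  | none => (some current_sum, 1)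
  | some m =>
    if current_sum < m then (some current_sum, 1)
    else if current_sum = m then (some m, st.2 + 1)
    else st

-- invariant of A's fold: first component is the minimum digit sum so far, second its multiplicity
theorem foldA_inv (l : List Int) :
    match (l.foldl pvStepA (none, 0)).1 with
    | none => l = [] ∧ (l.foldl pvStepA (none, 0)).2 = 0
    | some m => m ∈ l.map pvAltDsum ∧ (∀ y ∈ l.map pvAltDsum, m ≤ y) ∧
        (l.foldl pvStepA (none, 0)).2 = (l.map pvAltDsum).count m := by
  induction l using List.reverseRecOn with
  | nil => simp
  | append_singleton l x ih =>
    rw [List.foldl_append]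
    have hx : pvDigitLoop 0 x = pvAltDsum x := by rw [pvDigitLoop_eq]; omega
    rcases hst : (l.foldl pvStepA (none, 0)).1 with _ | m
    · rw [hst] at ih
      obtain ⟨hl, _⟩ := ih
      subst hl
      simp [pvStepA, hx]
    · rw [hst] at ih
      obtain ⟨hmem, hmin, hcnt⟩ := ih
      simp only [List.foldl_cons, List.foldl_nil, pvStepA, hst]
      by_cases h1 : pvAltDsum x < m
      · have hzero : (l.map pvAltDsum).count (pvAltDsum x) = 0 := by
          rw [List.count_eq_zero]
          intro hmem2
          exact absurd (hmin _ hmem2) (by omega)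
        simp only [hx, if_pos h1]
        refine ⟨by simp, ?_, ?_⟩
        · intro y hy
          rcases (by simpa using hy : (∃ a ∈ l, pvAltDsum a = y) ∨ y = pvAltDsum x) with hy | hy
          · obtain ⟨a, ha, rfl⟩ := hy
            have := hmin _ (List.mem_map_of_mem ha)
            omega
          · omega
        · rw [List.map_append, List.count_append, hzero]
          simp
      · by_cases h2 : pvAltDsum x = m
        · simp only [hx, if_neg h1, if_pos h2]
          refine ⟨by simp [hmem], ?_, ?_⟩
          · intro y hy
            rcases (by simpa using hy : (∃ a ∈ l, pvAltDsum a = y) ∨ y = pvAltDsum x) with hy | hy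
            · obtain ⟨a, ha, rfl⟩ := hy
              exact hmin _ (List.mem_map_of_mem ha)
            · omega
          · rw [List.map_append, List.count_append, hcnt]
            simp [h2]
        · simp only [hx, if_neg h1, if_neg h2, hst]
          refine ⟨by simp [hmem], ?_, ?_⟩
          · intro y hy
            rcases (by simpa using hy : (∃ a ∈ l, pvAltDsum a = y) ∨ y = pvAltDsum x) with hy | hy
            · obtain ⟨a, ha, rfl⟩ := hy
              exact hmin _ (List.mem_map_of_mem ha)
            · omega
          · rw [List.map_append, List.count_append, hcnt]
            simp [h2]

theorem min_digit_sum_eq_fold (a b : Int) :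
    min_digit_sum a b = ((PySem.List.pyRange a (b + 1) 1).foldl pvStepA (none, 0)).2 := rfl

-- B's dict is the counter of the digit sums of the range
theorem alt_dict_eq (l : List Int) :
    l.foldl (fun (d : PySem.Dict Int Int) i => d.insert (pvAltDsum i) (d.getD (pvAltDsum i) 0 + 1))
      PySem.Dict.empty = PySem.Dict.counter (l.map pvAltDsum) := by
  rw [← PySem.Dict.foldl_insert_getD_add_one_eq_counter, List.foldl_map]

-- ===== VERDICT (by name: the statement is the Claim_ definition above) =====
theorem min_digit_sum_spec : Claim_equal_min_digit_sum := by
  intro a b _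
  unfold Spec_min_digit_sum min_digit_sum_alt
  rw [min_digit_sum_eq_fold]
  set l := PySem.List.pyRange a (b + 1) 1 with hl
  simp only [alt_dict_eq]
  have hkeys : (PySem.Dict.counter (l.map pvAltDsum)).keys = PySem.Set.ofList (l.map pvAltDsum) :=
    PySem.Dict.keys_counter _
  have hinv := foldA_inv l
  rcases hst : (l.foldl pvStepA (none, 0)).1 with _ | m
  · rw [hst] at hinv
    obtain ⟨hnil, hc⟩ := hinv
    rw [hnil]
    simp [PySem.Dict.counter, PySem.List.min?]
  · rw [hst] at hinv
    obtain ⟨hmem, hmin, hcnt⟩ := hinv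
    have hkeyiff : ∀ y, y ∈ (PySem.Dict.counter (l.map pvAltDsum)).keys ↔ y ∈ l.map pvAltDsum := by
      intro y; rw [hkeys]; exact PySem.Set.mem_ofList _ _
    rcases hmn : PySem.List.min? (PySem.Dict.counter (l.map pvAltDsum)).keys (fun x => x) with _ | m2
    · rw [PySem.List.min?_eq_none_iff] at hmn
      exact absurd ((hkeyiff m).mpr hmem) (by rw [hmn]; simp)
    · have hm2mem : m2 ∈ l.map pvAltDsum := (hkeyiff m2).mp (PySem.List.min?_mem hmn)
      have hm2min : ∀ y ∈ l.map pvAltDsum, m2 ≤ y := by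
        intro y hy
        exact PySem.List.min?_isMin hmn y ((hkeyiff y).mpr hy)
      have heq : m = m2 := le_antisymm (hmin _ hm2mem) (hm2min _ hmem)
      rw [hcnt, heq]
      show _ = (PySem.Dict.counter (l.map pvAltDsum)).getD m2 0
      rw [PySem.Dict.getD_counter]
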